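-- pv_equiv track=rewrite | github.com/Archie-MarqX/Data-Science | src/astronomy.py | get_Moon_Degrees_
-- ===== SOURCE A (Python) =====
-- def get_Moon_Degrees_(moon_Degree):
--     moon_Phases = []
--
--     for element in moon_Degree:
--         if element < 90:
--             moon_Phases.append("Lua Nova")
--         if element >= 90 and element < 180:
--             moon_Phases.append("Lua Crescente")
--         if element >= 180 and element < 270:
--             moon_Phases.append("Lua Cheia")
--         if element >= 270 and element < 360:
--             moon_Phases.append("Lua Minguante")
--         if element >= 360:
--             moon_Phases.append("Lua Nova")
--
--     return moon_Phases
-- ===== SOURCE B (Python) =====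
-- def get_Moon_Degrees_(moon_Degree):
--     bounds = (90, 180, 270, 360)
--     labels = ("Lua Nova", "Lua Crescente", "Lua Cheia", "Lua Minguante", "Lua Nova")
--     return [labels[sum(b <= element for b in bounds)] for element in moon_Degree]
-- ===== Notes on version B (the rewrite author's own statement) =====
-- stated objective: idiomatic
-- what changed: The five-branch if-chain with conditional appends is replaced by a static boundary/label table: each element's bucket index is the count of boundaries it has reached, and the result is one list comprehension over that lookup.
import Mathlib
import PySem

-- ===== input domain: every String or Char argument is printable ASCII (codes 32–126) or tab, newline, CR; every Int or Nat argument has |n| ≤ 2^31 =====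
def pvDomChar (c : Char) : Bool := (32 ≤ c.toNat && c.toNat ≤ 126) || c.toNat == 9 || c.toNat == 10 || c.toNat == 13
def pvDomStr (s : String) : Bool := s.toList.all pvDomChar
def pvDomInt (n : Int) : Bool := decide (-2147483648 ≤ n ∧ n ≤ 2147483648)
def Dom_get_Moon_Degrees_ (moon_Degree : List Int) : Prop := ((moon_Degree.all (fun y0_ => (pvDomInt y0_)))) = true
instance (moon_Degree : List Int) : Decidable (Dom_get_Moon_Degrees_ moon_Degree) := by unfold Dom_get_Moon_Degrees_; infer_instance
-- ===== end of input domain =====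

-- B replaces A's five-branch if-chain by a static boundary/label table lookup (bucket = count of boundaries reached) in one list comprehension; objective: idiomatic, same cost.


-- ===== PORT A =====
def pvStepA (moon_Phases : List String) (element : Int) : List String :=
  let moon_Phases := if element < 90 then moon_Phases ++ ["Lua Nova"] else moon_Phases
  let moon_Phases := if element ≥ 90 ∧ element < 180 then moon_Phases ++ ["Lua Crescente"] else moon_Phases
  let moon_Phases := if element ≥ 180 ∧ element < 270 then moon_Phases ++ ["Lua Cheia"] else moon_Phases
  let moon_Phases := if element ≥ 270 ∧ element < 360 then moon_Phases ++ ["Lua Minguante"] else moon_Phases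
  if element ≥ 360 then moon_Phases ++ ["Lua Nova"] else moon_Phases

def get_Moon_Degrees_ (moon_Degree : List Int) : List String :=
  moon_Degree.foldl pvStepA []

-- ===== PORT B =====
def pvLabel (element : Int) : String :=
  (["Lua Nova", "Lua Crescente", "Lua Cheia", "Lua Minguante", "Lua Nova"]).getD
    (([90, 180, 270, 360] : List Int).countP (fun b => b ≤ element)) ""

def get_Moon_Degrees__alt (moon_Degree : List Int) : List String :=
  moon_Degree.map pvLabel

-- ===== PRECONDITION & SPEC =====
def Spec_get_Moon_Degrees_ (moon_Degree : List Int) (out : List String) : Prop := out = get_Moon_Degrees__alt moon_Degree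
instance (moon_Degree : List Int) (out : List String) : Decidable (Spec_get_Moon_Degrees_ moon_Degree out) := by unfold Spec_get_Moon_Degrees_; infer_instance

-- ===== CLAIM (what is proved, stated in full; the proofs are below) =====
def Claim_equal_get_Moon_Degrees_ : Prop := ∀ (moon_Degree : List Int), Dom_get_Moon_Degrees_ moon_Degree → Spec_get_Moon_Degrees_ moon_Degree (get_Moon_Degrees_ moon_Degree)

-- ===== LEMMAS AND PROOFS =====

-- ===== VERDICT (by name: the statement is the Claim_ definition above) =====
theorem pvStepA_eq (acc : List String) (e : Int) : pvStepA acc e = acc ++ [pvLabel e] := by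
  unfold pvStepA pvLabel
  simp only [List.countP, List.countP.go, Bool.cond_decide]
  split_ifs <;> first | rfl | omega | simp

theorem get_Moon_Degrees__spec : Claim_equal_get_Moon_Degrees_ := by
  intro xs hdom
  show get_Moon_Degrees_ xs = get_Moon_Degrees__alt xs
  clear hdom
  unfold get_Moon_Degrees_ get_Moon_Degrees__alt
  have h : ∀ acc, xs.foldl pvStepA acc = acc ++ xs.map pvLabel := by
    induction xs with
    | nil => simp
    | cons e t ih => intro acc; simp [List.foldl, pvStepA_eq, ih]
  simpa using h []
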